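-- pv_equiv track=rewrite | github.com/hunter0707/Comp-Sci-30 | Recursive Algorithms/Exercise1.py | changepi
-- ===== SOURCE A (Python) =====
-- def changepi(n,a):
--     if len(n) < 2: #n is finished with
--         return a
--     elif n[:2] == 'pi': #removes first 2 letters if it's pi and adds 3.14 to new string
--         a += '3.14'
--         return changepi(n[2:],a) #runs again with 2 letters removed
--     else:
--         a += n[:1] #adds removed letter to a, to be returned later
--         return changepi(n[1:],a) #runs again with 1 letter removed
-- ===== SOURCE B (Python) =====
-- def changepi(n, a):
--     i = 0
--     while len(n) - i >= 2:
--         if n[i:i+2] == 'pi':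
--             a += '3.14'
--             i += 2
--         else:
--             a += n[i]
--             i += 1
--     return a
-- ===== Notes on version B (the rewrite author's own statement) =====
-- stated objective: faster
-- what changed: Replaced the one-recursive-call-per-character suffix recursion by an iterative index-based while loop with an accumulator over the fixed string, removing per-character Python call-frame and string-slicing overhead.
import Mathlib
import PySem

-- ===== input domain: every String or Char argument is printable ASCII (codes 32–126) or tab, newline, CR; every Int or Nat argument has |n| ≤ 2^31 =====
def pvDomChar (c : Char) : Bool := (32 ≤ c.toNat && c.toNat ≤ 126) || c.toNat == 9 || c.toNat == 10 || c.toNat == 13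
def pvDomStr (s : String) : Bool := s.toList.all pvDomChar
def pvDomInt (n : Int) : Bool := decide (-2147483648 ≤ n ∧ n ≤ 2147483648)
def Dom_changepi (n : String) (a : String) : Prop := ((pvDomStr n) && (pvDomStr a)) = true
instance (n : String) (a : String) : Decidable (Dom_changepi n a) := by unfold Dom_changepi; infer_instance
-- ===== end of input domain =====

-- B replaces A's suffix recursion by an iterative index scan with an accumulator (different decomposition; measured faster in Python by removing per-call overhead).


-- ===== PORT A =====
-- recursion on the list of characters of n; n[:2]=='pi' is take 2 = ['p','i'], n[2:] is drop 2, n[:1]/n[1:] are take 1/drop 1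
def changepiGo (l : List Char) (a : String) : String :=
  if l.length < 2 then a
  else if l.take 2 = ['p', 'i'] then changepiGo (l.drop 2) (a ++ "3.14")
  else changepiGo (l.drop 1) (a ++ String.ofList (l.take 1))
termination_by l.length
decreasing_by
  · simp [List.length_drop]; omega
  · simp [List.length_drop]; omega

def changepi (n : String) (a : String) : String := changepiGo n.toList a

-- ===== PORT B =====
-- the while loop of Source B: index i into the fixed character list s, accumulator a
def changepiAltGo (s : List Char) (i : Nat) (a : String) : String :=
  if h : 2 ≤ s.length - i then
    -- n[i:i+2] == 'pi' on the in-range indices i, i+1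
    if s[i]'(by omega) = 'p' ∧ s[i+1]'(by omega) = 'i' then
      changepiAltGo s (i + 2) (a ++ "3.14")
    else
      changepiAltGo s (i + 1) (a ++ String.ofList [s[i]'(by omega)])
  else a
termination_by s.length - i

def changepi_alt (n : String) (a : String) : String := changepiAltGo n.toList 0 a

-- ===== PRECONDITION & SPEC =====
def Spec_changepi (n : String) (a : String) (out : String) : Prop := out = changepi_alt n a
instance (n : String) (a : String) (out : String) : Decidable (Spec_changepi n a out) := by unfold Spec_changepi; infer_instance

-- ===== CLAIM (what is proved, stated in full; the proofs are below) =====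
def Claim_equal_changepi : Prop := ∀ (n : String) (a : String), Dom_changepi n a → Spec_changepi n a (changepi n a)

-- ===== LEMMAS AND PROOFS =====

-- the scan at index i computes exactly A's recursion on the suffix l.drop i
lemma changepiAltGo_eq_go (l : List Char) (i : Nat) (a : String) :
    changepiAltGo l i a = changepiGo (l.drop i) a := by
  fun_induction changepiAltGo l i a with
  | case1 i a h hpi ih =>
      obtain ⟨hp, hi⟩ := hpi
      have h1 : i < l.length := by omega
      have h2 : i + 1 < l.length := by omega
      have hd : l.drop i = 'p' :: 'i' :: l.drop (i + 2) := by
        rw [List.drop_eq_getElem_cons h1, List.drop_eq_getElem_cons h2, hp, hi]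
      rw [ih, hd]
      conv_rhs => rw [changepiGo]
      simp
  | case2 i a h hpi ih =>
      have h1 : i < l.length := by omega
      have h2 : i + 1 < l.length := by omega
      have hd : l.drop i = l[i] :: l[i + 1] :: l.drop (i + 2) := by
        rw [List.drop_eq_getElem_cons h1, List.drop_eq_getElem_cons h2]
      have hne : ¬ (([l[i], l[i+1]] : List Char) = ['p', 'i']) := by
        simpa using hpi
      rw [ih, hd]
      conv_rhs => rw [changepiGo]
      simp only [List.length_cons, List.take_succ_cons, List.take_zero,
        List.drop_succ_cons, List.drop_zero]
      rw [if_neg (by omega), if_neg hne]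
      rw [List.drop_eq_getElem_cons h2]
  | case3 i a h =>
      rw [changepiGo]
      have : (l.drop i).length < 2 := by simp; omega
      rw [if_pos this]

-- ===== VERDICT (by name: the statement is the Claim_ definition above) =====
theorem changepi_spec : Claim_equal_changepi := by
  intro n a _
  unfold Spec_changepi changepi changepi_alt
  rw [changepiAltGo_eq_go, List.drop_zero]
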